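-- pv_equiv track=rewrite | github.com/soncan9a2/BaiTapCaNhanTriTueNhanTao | Do_an_ca_nhan.py | _get_state_actions
-- ===== SOURCE A (Python) =====
-- class PuzzleState:
--     def __init__(self, state_string):
--         self.state = state_string
--
--     def get_blank_position(self):
--         index = self.state.index('_')
--         return divmod(index, 3)
--
--     def get_next_states(self):
--         index = self.state.index('_')
--         row, col = divmod(index, 3)
--         moves = []
--         directions = [(-1, 0), (1, 0), (0, -1), (0, 1)]
--         for dr, dc in directions:
--             new_row, new_col = row + dr, col + dc
--             if 0 <= new_row < 3 and 0 <= new_col < 3: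
--                 new_index = new_row * 3 + new_col
--                 new_state = list(self.state)
--                 new_state[index], new_state[new_index] = new_state[new_index], new_state[index]
--                 moves.append(''.join(new_state))
--         return moves
--
--     def __eq__(self, other):
--         if isinstance(other, PuzzleState):
--             return self.state == other.state
--         return self.state == other
--
--     def __hash__(self):
--         return hash(self.state)
--
--     def __str__(self):
--         return self.state
--
-- def _get_state_actions(state):
--     state_obj = PuzzleState(state)
--     next_states = state_obj.get_next_states()
--
--     actions = []
--     for next_state in next_states:
--         blank_idx_current = state.index('_')
--         blank_idx_next = next_state.index('_')
--
--         row_current, col_current = divmod(blank_idx_current, 3)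
--         row_next, col_next = divmod(blank_idx_next, 3)
--
--         if row_next < row_current:
--             actions.append(("UP", next_state))
--         elif row_next > row_current:
--             actions.append(("DOWN", next_state))
--         elif col_next < col_current:
--             actions.append(("LEFT", next_state))
--         elif col_next > col_current:
--             actions.append(("RIGHT", next_state))
--
--     return actions
-- ===== SOURCE B (Python) =====
-- def _get_state_actions(state):
--     index = state.index('_')
--     row, col = divmod(index, 3)
--     actions = []
--     for (dr, dc), label in [((-1, 0), "UP"), ((1, 0), "DOWN"),
--                             ((0, -1), "LEFT"), ((0, 1), "RIGHT")]:
--         new_row, new_col = row + dr, col + dc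
--         if 0 <= new_row < 3 and 0 <= new_col < 3:
--             new_index = new_row * 3 + new_col
--             chars = list(state)
--             chars[index], chars[new_index] = chars[new_index], chars[index]
--             actions.append((label, ''.join(chars)))
--     return actions
-- ===== Notes on version B (the rewrite author's own statement) =====
-- stated objective: simpler
-- what changed: B replaces A's two-phase scheme (PuzzleState.get_next_states builds the successor strings, then a second loop re-derives each direction by comparing blank positions) with a single loop over labelled direction offsets that bounds-checks, swaps and appends (label, new_state) directly.
import Mathlib
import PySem

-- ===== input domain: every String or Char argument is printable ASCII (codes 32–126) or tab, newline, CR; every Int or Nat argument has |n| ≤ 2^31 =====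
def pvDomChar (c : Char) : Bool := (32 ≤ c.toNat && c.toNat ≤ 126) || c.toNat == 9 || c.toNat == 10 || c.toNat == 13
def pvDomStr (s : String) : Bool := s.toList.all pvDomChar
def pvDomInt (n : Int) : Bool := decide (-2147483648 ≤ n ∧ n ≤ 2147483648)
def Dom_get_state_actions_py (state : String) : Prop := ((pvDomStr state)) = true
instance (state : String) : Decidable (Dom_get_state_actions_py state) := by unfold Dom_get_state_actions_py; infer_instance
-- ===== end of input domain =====

-- B replaces A's two phases (generate successor strings, then re-derive each direction by
-- comparing blank positions) with a single loop over labelled directions; same return value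
-- (objective: simpler).

-- the simultaneous list swap both Pythons perform: new[i], new[j] = old[j], old[i]
def pvSwap (cs : List Char) (i j : Nat) : List Char :=
  (cs.set i (cs.getD j ' ')).set j (cs.getD i ' ')

-- ===== PORT A =====
-- PuzzleState.get_next_states: the first loop, building the successor strings
def pvNextStates (cs : List Char) (index : Nat) : List (List Char) :=
  [((-1 : Int), (0 : Int)), (1, 0), (0, -1), (0, 1)].foldl
    (fun moves d =>
      let new_row : Int := ((index / 3 : Nat) : Int) + d.1
      let new_col : Int := ((index % 3 : Nat) : Int) + d.2
      if 0 ≤ new_row ∧ new_row < 3 ∧ 0 ≤ new_col ∧ new_col < 3 then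
        moves ++ [pvSwap cs index ((new_row * 3 + new_col).toNat)]
      else moves) []

-- _get_state_actions' second loop: re-derive the direction of each successor from blank positions
def pvLabelLoop (index : Nat) (next_states : List (List Char)) : List (String × String) :=
  next_states.foldl
    (fun actions ns =>
      match PySem.List.index? ns '_' with
      | none => actions  -- unreachable when '_' occurs in the state: the successor also contains '_'
      | some j =>
        if j / 3 < index / 3 then actions ++ [("UP", String.ofList ns)]
        else if index / 3 < j / 3 then actions ++ [("DOWN", String.ofList ns)]
        else if j % 3 < index % 3 then actions ++ [("LEFT", String.ofList ns)]
        else if index % 3 < j % 3 then actions ++ [("RIGHT", String.ofList ns)]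
        else actions) []

def get_state_actions_py (state : String) : List (String × String) :=
  match PySem.List.index? state.toList '_' with
  | none => []  -- Python: state.index('_') raises ValueError; excluded by Pre_
  | some index => pvLabelLoop index (pvNextStates state.toList index)

-- ===== PORT B =====
def get_state_actions_py_alt (state : String) : List (String × String) :=
  match PySem.List.index? state.toList '_' with
  | none => []  -- Python: state.index('_') raises ValueError; excluded by Pre_
  | some index =>
    [(((-1 : Int), (0 : Int)), "UP"), ((1, 0), "DOWN"), ((0, -1), "LEFT"), ((0, 1), "RIGHT")].foldl
      (fun actions dl =>
        let new_row : Int := ((index / 3 : Nat) : Int) + dl.1.1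
        let new_col : Int := ((index % 3 : Nat) : Int) + dl.1.2
        if 0 ≤ new_row ∧ new_row < 3 ∧ 0 ≤ new_col ∧ new_col < 3 then
          actions ++ [(dl.2, String.ofList (pvSwap state.toList index ((new_row * 3 + new_col).toNat)))]
        else actions) []

-- ===== PRECONDITION & SPEC =====
-- Pre_ excludes (a) states in which '_' is missing or a legal move's swap index falls beyond the
-- end of the string — there A raises ValueError/IndexError — and (b) states with more than one
-- '_', a defensible corner on which A's labels, re-derived from the FIRST '_' of the successor,
-- are an accident of the search (B labels the move it actually made).
def Pre_get_state_actions_py (state : String) : Prop :=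
  state.toList.count '_' = 1 ∧
  (state.toList.idxOf '_' / 3 < 2 → state.toList.idxOf '_' + 3 < state.toList.length) ∧
  (state.toList.idxOf '_' / 3 < 3 ∧ state.toList.idxOf '_' % 3 < 2 →
    state.toList.idxOf '_' + 1 < state.toList.length)
instance (state : String) : Decidable (Pre_get_state_actions_py state) := by
  unfold Pre_get_state_actions_py; infer_instance

def pvWitness_get_state_actions_py : String := "1234_5678"

def Spec_get_state_actions_py (state : String) (out : List (String × String)) : Prop := out = get_state_actions_py_alt state
instance (state : String) (out : List (String × String)) : Decidable (Spec_get_state_actions_py state out) := by unfold Spec_get_state_actions_py; infer_instance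

-- ===== CLAIM (what is proved, stated in full; the proofs are below) =====
def Claim_equal_get_state_actions_py : Prop := ∀ (state : String), Dom_get_state_actions_py state → Pre_get_state_actions_py state → Spec_get_state_actions_py state (get_state_actions_py state)

-- ===== LEMMAS AND PROOFS =====

-- the first '_' of pre ++ '_' :: suf with '_' ∉ pre sits at pre.length
lemma pv_idxOf_aux (pre suf : List Char) (hpre : '_' ∉ pre) :
    (pre ++ '_' :: suf).idxOf '_' = pre.length := by
  induction pre with
  | nil => simp
  | cons a t ih =>
    simp only [List.mem_cons, not_or] at hpre
    have ha : a ≠ '_' := Ne.symm hpre.1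
    simp [ha, ih hpre.2]

-- if the first '_' is at position i, idxOf agrees with index?
lemma pv_idxOf_eq {cs : List Char} {i : Nat} (h : PySem.List.index? cs '_' = some i) :
    cs.idxOf '_' = i := by
  obtain ⟨pre, suf, rfl, rfl, hpre⟩ := (PySem.List.index?_eq_some_iff cs '_' i).mp h
  exact pv_idxOf_aux pre suf hpre

-- converse of getElem_of_index?_eq_some: a first occurrence determines index?
lemma pv_index?_of_first {s : List Char} {k : Nat} (hk : k < s.length)
    (h1 : s[k]? = some '_') (h2 : ∀ m, m < k → s[m]? ≠ some '_') :
    PySem.List.index? s '_' = some k := by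
  rw [PySem.List.index?_eq_some_iff]
  refine ⟨s.take k, s.drop (k + 1), ?_, by simp [Nat.le_of_lt hk], ?_⟩
  · conv_lhs => rw [← List.take_append_drop k s]
    rw [List.drop_eq_getElem_cons hk]
    have : s[k] = '_' := by
      have := List.getElem?_eq_getElem hk
      rw [h1] at this; exact (Option.some_injective _ this).symm
    rw [this]
  · intro hmem
    obtain ⟨m, hm⟩ := List.mem_iff_getElem?.mp hmem
    have hmk : m < k := by
      by_contra hge
      rw [List.getElem?_take_eq_none (by omega)] at hm
      simp at hm
    rw [List.getElem?_take_of_lt hmk] at hm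
    exact h2 m hmk hm

-- '_' is unique: every other position holds a different character
lemma pv_uniq {cs : List Char} {i : Nat} (hcount : cs.count '_' = 1)
    (hidx : PySem.List.index? cs '_' = some i) :
    ∀ m, m ≠ i → cs[m]? ≠ some '_' := by
  obtain ⟨pre, suf, rfl, rfl, hpre⟩ := (PySem.List.index?_eq_some_iff cs '_' i).mp hidx
  have hsuf : '_' ∉ suf := by
    rw [List.count_append, List.count_cons] at hcount
    have h0 : pre.count '_' = 0 := List.count_eq_zero.mpr hpre
    have : suf.count '_' = 0 := by simp [h0] at hcount; omega
    exact List.count_eq_zero.mp this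
  intro m hne hget
  rcases Nat.lt_or_ge m pre.length with hlt | hge
  · rw [List.getElem?_append_left hlt] at hget
    exact hpre (List.mem_iff_getElem?.mpr ⟨m, hget⟩)
  · rw [List.getElem?_append_right hge] at hget
    rcases hsub : m - pre.length with _ | p
    · omega
    · rw [hsub, List.getElem?_cons_succ] at hget
      exact hsuf (List.mem_iff_getElem?.mpr ⟨p, hget⟩)

-- the swapped successor has its first '_' exactly at the target square
lemma pv_index?_swap (cs : List Char) (i j : Nat) (hcount : cs.count '_' = 1)
    (hidx : PySem.List.index? cs '_' = some i) (hj : j < cs.length) (hne : j ≠ i) :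
    PySem.List.index? (pvSwap cs i j) '_' = some j := by
  obtain ⟨hi, hci, _⟩ := PySem.List.getElem_of_index?_eq_some hidx
  have huniq := pv_uniq hcount hidx
  have hget : ∀ m, (pvSwap cs i j)[m]? =
      if m = j then some cs[i] else if m = i then some cs[j] else cs[m]? := by
    intro m
    by_cases hmj : m = j
    · subst hmj
      simp [pvSwap, List.length_set, hj,
        List.getElem?_eq_getElem hi]
    · by_cases hmi : m = i
      · subst hmi
        simp [pvSwap, List.length_set, hi, hmj, Ne.symm hmj,
          List.getElem?_eq_getElem hj]
      · simp [pvSwap, hmj, hmi, Ne.symm hmj, Ne.symm hmi]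
  apply pv_index?_of_first (by simpa [pvSwap] using hj)
  · rw [hget j, if_pos rfl, hci]
  · intro m hm
    rw [hget m, if_neg (by omega)]
    rcases eq_or_ne m i with rfl | hmi
    · rw [if_pos rfl]
      intro hcontra
      exact huniq j hne (by rw [List.getElem?_eq_getElem hj, (Option.some_injective _ hcontra)])
    · rw [if_neg hmi]
      exact huniq m hmi

-- ===== VERDICT (by name: the statement is the Claim_ definition above) =====
theorem get_state_actions_py_spec : Claim_equal_get_state_actions_py := by
  intro state _hdom hpre
  unfold Spec_get_state_actions_py
  obtain ⟨hcount, hb1, hb2⟩ := hpre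
  unfold get_state_actions_py get_state_actions_py_alt
  rcases heq : PySem.List.index? state.toList '_' with _ | i
  · rw [PySem.List.index?_eq_idxOf?] at heq
    try simp only [PySem.List.index?_eq_idxOf?, heq]
  · have heqI : List.idxOf? '_' state.toList = some i := by
      rw [PySem.List.index?_eq_idxOf?] at heq; exact heq
    rw [pv_idxOf_eq (by rw [PySem.List.index?_eq_idxOf?]; exact heqI)] at hb1 hb2
    obtain ⟨hi, hci, _⟩ := PySem.List.getElem_of_index?_eq_some
      (show PySem.List.index? state.toList '_' = some i by
        rw [PySem.List.index?_eq_idxOf?]; exact heqI)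
    have W : ∀ j, j < state.toList.length → j ≠ i →
        List.idxOf? '_' (pvSwap state.toList i j) = some j := by
      intro j hj hne
      have := pv_index?_swap state.toList i j hcount
        (by rw [PySem.List.index?_eq_idxOf?]; exact heqI) hj hne
      rwa [PySem.List.index?_eq_idxOf?] at this
    simp only [heqI]
    have hc3 : i % 3 < 3 := by omega
    rcases Nat.lt_or_ge (i / 3) 4 with h4 | h4
    · have hi12 : i < 12 := by omega
      interval_cases i
      · have hA : 0+3 < state.toList.length := hb1 (by norm_num)
        have hB : 0+1 < state.toList.length := hb2 (by norm_num)
        have w0 := W 3 (by omega) (by omega)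
        have w1 := W 1 (by omega) (by omega)
        have t0 : ((3 : Int)).toNat = 3 := rfl
        have t1 : ((1 : Int)).toNat = 1 := rfl
        simp only [pvNextStates, pvLabelLoop, List.foldl_cons, List.foldl_nil]
        norm_num [t0, t1, w0, w1]
      · have hA : 1+3 < state.toList.length := hb1 (by norm_num)
        have hB : 1+1 < state.toList.length := hb2 (by norm_num)
        have w0 := W 4 (by omega) (by omega)
        have w1 := W 0 (by omega) (by omega)
        have w2 := W 2 (by omega) (by omega)
        have t0 : ((4 : Int)).toNat = 4 := rfl
        have t1 : ((0 : Int)).toNat = 0 := rfl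
        have t2 : ((2 : Int)).toNat = 2 := rfl
        simp only [pvNextStates, pvLabelLoop, List.foldl_cons, List.foldl_nil]
        norm_num [t0, t1, t2, w0, w1, w2]
      · have hA : 2+3 < state.toList.length := hb1 (by norm_num)
        have w0 := W 5 (by omega) (by omega)
        have w1 := W 1 (by omega) (by omega)
        have t0 : ((5 : Int)).toNat = 5 := rfl
        have t1 : ((1 : Int)).toNat = 1 := rfl
        simp only [pvNextStates, pvLabelLoop, List.foldl_cons, List.foldl_nil]
        norm_num [t0, t1, w0, w1]
      · have hA : 3+3 < state.toList.length := hb1 (by norm_num)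
        have hB : 3+1 < state.toList.length := hb2 (by norm_num)
        have w0 := W 0 (by omega) (by omega)
        have w1 := W 6 (by omega) (by omega)
        have w2 := W 4 (by omega) (by omega)
        have t0 : ((0 : Int)).toNat = 0 := rfl
        have t1 : ((6 : Int)).toNat = 6 := rfl
        have t2 : ((4 : Int)).toNat = 4 := rfl
        simp only [pvNextStates, pvLabelLoop, List.foldl_cons, List.foldl_nil]
        norm_num [t0, t1, t2, w0, w1, w2]
      · have hA : 4+3 < state.toList.length := hb1 (by norm_num)
        have hB : 4+1 < state.toList.length := hb2 (by norm_num)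
        have w0 := W 1 (by omega) (by omega)
        have w1 := W 7 (by omega) (by omega)
        have w2 := W 3 (by omega) (by omega)
        have w3 := W 5 (by omega) (by omega)
        have t0 : ((1 : Int)).toNat = 1 := rfl
        have t1 : ((7 : Int)).toNat = 7 := rfl
        have t2 : ((3 : Int)).toNat = 3 := rfl
        have t3 : ((5 : Int)).toNat = 5 := rfl
        simp only [pvNextStates, pvLabelLoop, List.foldl_cons, List.foldl_nil]
        norm_num [t0, t1, t2, t3, w0, w1, w2, w3]
      · have hA : 5+3 < state.toList.length := hb1 (by norm_num)
        have w0 := W 2 (by omega) (by omega)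
        have w1 := W 8 (by omega) (by omega)
        have w2 := W 4 (by omega) (by omega)
        have t0 : ((2 : Int)).toNat = 2 := rfl
        have t1 : ((8 : Int)).toNat = 8 := rfl
        have t2 : ((4 : Int)).toNat = 4 := rfl
        simp only [pvNextStates, pvLabelLoop, List.foldl_cons, List.foldl_nil]
        norm_num [t0, t1, t2, w0, w1, w2]
      · have hB : 6+1 < state.toList.length := hb2 (by norm_num)
        have w0 := W 3 (by omega) (by omega)
        have w1 := W 7 (by omega) (by omega)
        have t0 : ((3 : Int)).toNat = 3 := rfl
        have t1 : ((7 : Int)).toNat = 7 := rfl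
        simp only [pvNextStates, pvLabelLoop, List.foldl_cons, List.foldl_nil]
        norm_num [t0, t1, w0, w1]
      · have hB : 7+1 < state.toList.length := hb2 (by norm_num)
        have w0 := W 4 (by omega) (by omega)
        have w1 := W 6 (by omega) (by omega)
        have w2 := W 8 (by omega) (by omega)
        have t0 : ((4 : Int)).toNat = 4 := rfl
        have t1 : ((6 : Int)).toNat = 6 := rfl
        have t2 : ((8 : Int)).toNat = 8 := rfl
        simp only [pvNextStates, pvLabelLoop, List.foldl_cons, List.foldl_nil]
        norm_num [t0, t1, t2, w0, w1, w2]
      · have w0 := W 5 (by omega) (by omega)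
        have w1 := W 7 (by omega) (by omega)
        have t0 : ((5 : Int)).toNat = 5 := rfl
        have t1 : ((7 : Int)).toNat = 7 := rfl
        simp only [pvNextStates, pvLabelLoop, List.foldl_cons, List.foldl_nil]
        norm_num [t0, t1, w0, w1]
      · have w0 := W 6 (by omega) (by omega)
        have t0 : ((6 : Int)).toNat = 6 := rfl
        simp only [pvNextStates, pvLabelLoop, List.foldl_cons, List.foldl_nil]
        norm_num [t0, w0]
      · have w0 := W 7 (by omega) (by omega)
        have t0 : ((7 : Int)).toNat = 7 := rfl
        simp only [pvNextStates, pvLabelLoop, List.foldl_cons, List.foldl_nil]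
        norm_num [t0, w0]
      · have w0 := W 8 (by omega) (by omega)
        have t0 : ((8 : Int)).toNat = 8 := rfl
        simp only [pvNextStates, pvLabelLoop, List.foldl_cons, List.foldl_nil]
        norm_num [t0, w0]
    · -- i / 3 ≥ 4 : no move is in bounds; both sides are []
      simp only [pvNextStates, pvLabelLoop, List.foldl_cons, List.foldl_nil]
      split_ifs <;> first | rfl | (exfalso; omega)
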